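-- pv_equiv track=rewrite | github.com/ubonpartners/stuff | stuff/ultralytics.py | attributes_from_class_names
-- ===== SOURCE A (Python) =====
-- def attributes_from_class_names(class_names):
--     """
--     Detect class names that correspond to attributes of a base
--     class. Returns a list of attribtues
--     e.g. person_male class -> person:male attribute
--     """
--     attributes=[]
--     for c in class_names:
--         if c.startswith("person_"):
--             attributes.append(c.replace("person_", "person:"))
--     for c in class_names:
--         if c.startswith("face_"):
--             attributes.append(c.replace("face_", "face:"))
--     return attributes
-- ===== SOURCE B (Python) =====
-- def attributes_from_class_names(class_names):
--     persons, faces = [], []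
--     for c in class_names:
--         if c.startswith("person_"):
--             persons.append(c.replace("person_", "person:"))
--         elif c.startswith("face_"):
--             faces.append(c.replace("face_", "face:"))
--     return persons + faces
-- ===== Notes on version B (the rewrite author's own statement) =====
-- stated objective: simpler
-- what changed: Single pass over class_names maintaining two buckets (persons, faces) with an elif, concatenated at the end, instead of two full scans of the list.
import Mathlib
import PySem

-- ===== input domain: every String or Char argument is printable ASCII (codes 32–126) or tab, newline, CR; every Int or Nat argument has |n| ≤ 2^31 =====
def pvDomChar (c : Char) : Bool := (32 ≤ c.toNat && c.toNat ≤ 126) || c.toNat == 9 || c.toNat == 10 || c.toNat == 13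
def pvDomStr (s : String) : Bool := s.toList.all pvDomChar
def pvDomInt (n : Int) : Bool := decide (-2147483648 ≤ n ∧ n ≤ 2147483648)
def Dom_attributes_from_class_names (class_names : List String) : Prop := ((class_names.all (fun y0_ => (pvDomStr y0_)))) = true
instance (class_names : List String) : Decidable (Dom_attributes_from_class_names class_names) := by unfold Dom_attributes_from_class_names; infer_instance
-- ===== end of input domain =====

-- ===== PORT A =====
-- A: two passes; first appends all person_ renames, then all face_ renames.
def attributes_from_class_names (class_names : List String) : List String :=
  let attributes := class_names.foldl (fun acc c =>
    if PySem.Str.startswith c "person_" then acc ++ [PySem.Str.replace c "person_" "person:"] else acc) []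
  class_names.foldl (fun acc c =>
    if PySem.Str.startswith c "face_" then acc ++ [PySem.Str.replace c "face_" "face:"] else acc) attributes

-- ===== PORT B =====
-- B: one pass maintaining two buckets (persons, faces) with an elif; result is persons ++ faces.
def attributes_from_class_names_alt (class_names : List String) : List String :=
  let pf := class_names.foldl (fun (pf : List String × List String) c =>
    if PySem.Str.startswith c "person_" then (pf.1 ++ [PySem.Str.replace c "person_" "person:"], pf.2)
    else if PySem.Str.startswith c "face_" then (pf.1, pf.2 ++ [PySem.Str.replace c "face_" "face:"])
    else pf) ([], [])
  pf.1 ++ pf.2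

-- ===== PRECONDITION & SPEC =====
def Spec_attributes_from_class_names (class_names : List String) (out : List String) : Prop := out = attributes_from_class_names_alt class_names
instance (class_names : List String) (out : List String) : Decidable (Spec_attributes_from_class_names class_names out) := by unfold Spec_attributes_from_class_names; infer_instance

-- ===== CLAIM (what is proved, stated in full; the proofs are below) =====
def Claim_equal_attributes_from_class_names : Prop := ∀ (class_names : List String), Dom_attributes_from_class_names class_names → Spec_attributes_from_class_names class_names (attributes_from_class_names class_names)

-- ===== LEMMAS AND PROOFS =====


lemma pv_not_face (c : String) (h : PySem.Str.startswith c "person_" = true) :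
    PySem.Str.startswith c "face_" = false := by
  by_contra hf
  rw [Bool.not_eq_false] at hf
  rw [PySem.Str.startswith_eq, PySem.Chars.startswith_iff] at h hf
  obtain ⟨t1, h1⟩ := h
  obtain ⟨t2, h2⟩ := hf
  rw [← h1] at h2
  simp at h2

lemma pv_pair_fold (xs : List String) (p f : List String) :
    xs.foldl (fun (pf : List String × List String) c =>
      if PySem.Str.startswith c "person_" then (pf.1 ++ [PySem.Str.replace c "person_" "person:"], pf.2)
      else if PySem.Str.startswith c "face_" then (pf.1, pf.2 ++ [PySem.Str.replace c "face_" "face:"])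
      else pf) (p, f)
    = (xs.foldl (fun acc c => if PySem.Str.startswith c "person_" then acc ++ [PySem.Str.replace c "person_" "person:"] else acc) p,
       xs.foldl (fun acc c => if PySem.Str.startswith c "face_" then acc ++ [PySem.Str.replace c "face_" "face:"] else acc) f) := by
  induction xs generalizing p f with
  | nil => rfl
  | cons c xs ih =>
    simp only [List.foldl]
    by_cases hp : PySem.Str.startswith c "person_" = true
    · rw [hp, pv_not_face c hp]
      simp only [if_true, Bool.false_eq_true, if_false]
      exact ih _ _
    · rw [Bool.not_eq_true] at hp
      rw [hp]
      by_cases hf : PySem.Str.startswith c "face_" = true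
      · rw [hf]
        simp only [Bool.false_eq_true, if_false, if_true]
        exact ih _ _
      · rw [Bool.not_eq_true] at hf
        rw [hf]
        simp only [Bool.false_eq_true, if_false]
        exact ih _ _

-- ===== VERDICT (by name: the statement is the Claim_ definition above) =====
theorem attributes_from_class_names_spec : Claim_equal_attributes_from_class_names := by
  intro xs _
  unfold Spec_attributes_from_class_names attributes_from_class_names attributes_from_class_names_alt
  rw [pv_pair_fold]
  simp only [PySem.List.foldl_append_if, List.nil_append]
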